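-- pv_equiv track=rewrite | github.com/MigCast9/Personal-and-School-Projects | Python Class/solo_wof.py | underscoreString
-- ===== SOURCE A (Python) =====
-- def underscoreString(textLine): #sentence in this case is the sentence read from the file
--     listCharacters = []
--     listUnderscore = []
--
--     for i in range(len(textLine)):
--         listCharacters.append(textLine[i])
--
--     for j in range(len(listCharacters)):
--         if (listCharacters[j] != "'" and listCharacters[j] != ' ' and listCharacters[j] != '-' and listCharacters[j] != '_' and listCharacters[j] != '!' and listCharacters[j] != "&"):
--             listUnderscore.append("_")
--         else:
--             listUnderscore.append(listCharacters[j])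
--
--     return("".join(listUnderscore))
-- ===== SOURCE B (Python) =====
-- import re
--
-- def underscoreString(textLine):
--     return re.sub(r"[^' \-_!&]", "_", textLine)
-- ===== Notes on version B (the rewrite author's own statement) =====
-- stated objective: idiomatic
-- what changed: Replaces A's two index-driven loops building intermediate character lists with a single regex substitution over a negated six-character class.
import Mathlib
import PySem

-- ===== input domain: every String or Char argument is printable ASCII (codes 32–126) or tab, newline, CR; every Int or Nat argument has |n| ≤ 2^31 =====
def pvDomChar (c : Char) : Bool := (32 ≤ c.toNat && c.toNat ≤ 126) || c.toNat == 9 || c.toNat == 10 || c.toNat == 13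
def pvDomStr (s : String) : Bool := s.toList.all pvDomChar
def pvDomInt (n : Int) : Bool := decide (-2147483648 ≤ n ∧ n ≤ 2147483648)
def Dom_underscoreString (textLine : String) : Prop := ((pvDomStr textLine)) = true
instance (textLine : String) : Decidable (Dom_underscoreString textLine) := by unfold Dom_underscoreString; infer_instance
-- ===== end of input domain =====

-- B replaces A's two index-driven loops with a single regex substitution (idiomatic); same return value.

-- ===== PORT A =====
-- literal transliteration of A: copy chars one by one by index, then for each
-- index append '_' or the char, then join.
def underscoreString (textLine : String) : String :=
  let cs := textLine.toList
  let listCharacters : List Char :=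
    (PySem.List.pyRange 0 (PySem.Str.len textLine) 1).foldl
      (fun acc i => acc ++ [PySem.List.pyGetD cs i ' ']) []
  let listUnderscore : List Char :=
    (PySem.List.pyRange 0 (listCharacters.length : Int) 1).foldl
      (fun acc j =>
        let c := PySem.List.pyGetD listCharacters j ' '
        if c ≠ '\'' ∧ c ≠ ' ' ∧ c ≠ '-' ∧ c ≠ '_' ∧ c ≠ '!' ∧ c ≠ '&' then
          acc ++ ['_']
        else
          acc ++ [c]) []
  String.ofList listUnderscore

-- ===== PORT B =====
-- Source B is re.sub(r"[^' \-_!&]", "_", textLine): the single-character class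
-- substitution is ported exactly as one pass mapping each char outside the
-- six-character class to '_'.
def pvInClass (c : Char) : Bool :=
  c == '\'' || c == ' ' || c == '-' || c == '_' || c == '!' || c == '&'

def underscoreString_alt (textLine : String) : String :=
  String.ofList (textLine.toList.map (fun c => if pvInClass c then c else '_'))

-- ===== PRECONDITION & SPEC =====
def Spec_underscoreString (textLine : String) (out : String) : Prop := out = underscoreString_alt textLine
instance (textLine : String) (out : String) : Decidable (Spec_underscoreString textLine out) := by unfold Spec_underscoreString; infer_instance

-- ===== CLAIM (what is proved, stated in full; the proofs are below) =====
def Claim_equal_underscoreString : Prop := ∀ (textLine : String), Dom_underscoreString textLine → Spec_underscoreString textLine (underscoreString textLine)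

-- ===== LEMMAS AND PROOFS =====

-- a range-for over indices reading xs[j] is a fold over the list itself
theorem pv_fold_range (g : List Char → Char → List Char) (cs : List Char) (init : List Char) :
    (PySem.List.pyRange 0 ((cs.length : Int)) 1).foldl
      (fun acc i => g acc (PySem.List.pyGetD cs i ' ')) init = cs.foldl g init := by
  exact PySem.List.foldl_pyRange_zero_pyGetD' cs ' ' g init

-- A's first loop copies the string's characters.
theorem pv_copy_loop (cs : List Char) :
    (PySem.List.pyRange 0 ((cs.length : Int)) 1).foldl
      (fun acc i => acc ++ [PySem.List.pyGetD cs i ' ']) [] = cs := by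
  have h := pv_fold_range (fun a c => a ++ [c]) cs []
  rw [h]
  exact PySem.List.foldl_append_singleton_eq_self cs []

-- the body of A's second loop written as a fold equals the per-character map
theorem pv_fold_map (cs : List Char) (acc : List Char) :
    cs.foldl (fun a c =>
        if c ≠ '\'' ∧ c ≠ ' ' ∧ c ≠ '-' ∧ c ≠ '_' ∧ c ≠ '!' ∧ c ≠ '&' then
          a ++ ['_']
        else
          a ++ [c]) acc
      = acc ++ cs.map (fun c => if pvInClass c then c else '_') := by
  induction cs generalizing acc with
  | nil => simp
  | cons c rest ih =>
    simp only [List.foldl_cons, List.map_cons]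
    rw [ih]
    by_cases hc : c ≠ '\'' ∧ c ≠ ' ' ∧ c ≠ '-' ∧ c ≠ '_' ∧ c ≠ '!' ∧ c ≠ '&'
    · have : pvInClass c = false := by
        unfold pvInClass
        obtain ⟨h1, h2, h3, h4, h5, h6⟩ := hc
        simp [h1, h2, h3, h4, h5, h6]
      simp [hc, this]
    · have : pvInClass c = true := by
        unfold pvInClass
        push Not at hc
        by_cases e1 : c = '\''; · simp [e1]
        by_cases e2 : c = ' '; · simp [e2]
        by_cases e3 : c = '-'; · simp [e3]
        by_cases e4 : c = '_'; · simp [e4]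
        by_cases e5 : c = '!'; · simp [e5]
        simp [hc e1 e2 e3 e4 e5]
      simp [hc, this]

-- A's second loop is a map over the list.
theorem pv_second_loop (cs : List Char) :
    (PySem.List.pyRange 0 ((cs.length : Int)) 1).foldl
      (fun acc j =>
        let c := PySem.List.pyGetD cs j ' '
        if c ≠ '\'' ∧ c ≠ ' ' ∧ c ≠ '-' ∧ c ≠ '_' ∧ c ≠ '!' ∧ c ≠ '&' then
          acc ++ ['_']
        else
          acc ++ [c]) []
      = cs.map (fun c => if pvInClass c then c else '_') := by
  have hr := pv_fold_range (fun a c =>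
      if c ≠ '\'' ∧ c ≠ ' ' ∧ c ≠ '-' ∧ c ≠ '_' ∧ c ≠ '!' ∧ c ≠ '&' then
        a ++ ['_'] else a ++ [c]) cs []
  rw [show (fun (acc : List Char) (j : Int) =>
        let c := PySem.List.pyGetD cs j ' '
        if c ≠ '\'' ∧ c ≠ ' ' ∧ c ≠ '-' ∧ c ≠ '_' ∧ c ≠ '!' ∧ c ≠ '&' then
          acc ++ ['_']
        else
          acc ++ [c])
      = (fun acc j => (fun (a : List Char) (c : Char) =>
          if c ≠ '\'' ∧ c ≠ ' ' ∧ c ≠ '-' ∧ c ≠ '_' ∧ c ≠ '!' ∧ c ≠ '&' then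
            a ++ ['_'] else a ++ [c]) acc (PySem.List.pyGetD cs j ' ')) from rfl, hr]
  simpa using pv_fold_map cs []

-- ===== VERDICT (by name: the statement is the Claim_ definition above) =====
theorem underscoreString_spec : Claim_equal_underscoreString := by
  intro textLine _
  unfold Spec_underscoreString underscoreString underscoreString_alt
  simp only [PySem.Str.len_eq]
  rw [pv_copy_loop, pv_second_loop]
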